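-- pv_equiv track=rewrite | github.com/lucbouchard1/fantasy-disc-golf | src/dglib.py | make_opponents
-- ===== SOURCE A (Python) =====
-- def make_opponents(schedule, coaches):
--   opponents = []
--
--   for s in schedule:
--     opps = {}
--     for c in coaches:
--       for matchup in s:
--           if c in matchup:
--             opps[c] = list(filter(lambda n: n != c, matchup))[0]
--     opponents.append(opps)
--
--   return opponents
-- ===== SOURCE B (Python) =====
-- def make_opponents(schedule, coaches):
--     # One pass over each round's matchups (instead of re-scanning all matchups
--     # for every coach); results are then emitted in coaches order.
--     coach_set = set(coaches)
--     opponents = []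
--     for s in schedule:
--         mp = {}
--         for matchup in s:
--             for c in matchup:
--                 if c in coach_set:
--                     mp[c] = next(x for x in matchup if x != c)
--         opps = {}
--         for c in coaches:
--             if c in mp:
--                 opps[c] = mp[c]
--         opponents.append(opps)
--     return opponents
-- ===== Notes on version B (the rewrite author's own statement) =====
-- stated objective: faster
-- what changed: Instead of scanning every matchup for every coach in every round (A), B makes a single pass over each round's matchups assigning each participating name its opponent via a coaches set, then emits the mapping in coaches order.
import Mathlib
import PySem

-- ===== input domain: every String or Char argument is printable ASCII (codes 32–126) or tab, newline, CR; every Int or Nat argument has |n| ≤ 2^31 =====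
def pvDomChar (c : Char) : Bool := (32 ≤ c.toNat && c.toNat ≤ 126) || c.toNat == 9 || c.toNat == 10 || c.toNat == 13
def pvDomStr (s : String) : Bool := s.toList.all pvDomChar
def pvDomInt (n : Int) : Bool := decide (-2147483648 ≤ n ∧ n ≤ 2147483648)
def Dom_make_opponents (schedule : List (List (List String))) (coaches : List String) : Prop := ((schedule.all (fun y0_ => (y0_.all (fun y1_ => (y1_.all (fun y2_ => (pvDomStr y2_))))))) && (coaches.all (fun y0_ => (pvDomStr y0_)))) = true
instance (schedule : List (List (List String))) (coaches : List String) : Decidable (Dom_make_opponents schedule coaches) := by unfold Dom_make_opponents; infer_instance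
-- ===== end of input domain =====

-- B replaces A's per-coach rescan of all matchups by a single pass over each round's matchups (objective: faster).

-- ===== PORT A =====
-- opps[c] = list(filter(lambda n: n != c, matchup))[0]; the .getD "" default is only
-- reached when the filtered list is empty (IndexError in Python), which Pre_ excludes.
def make_opponents (schedule : List (List (List String))) (coaches : List String) : List (List (String × String)) :=
  schedule.foldl (fun opponents s =>
    opponents ++ [(coaches.foldl (fun opps c =>
      s.foldl (fun opps matchup =>
        if matchup.contains c then
          opps.insert c ((PySem.List.pyGet? (matchup.filter (fun n => !(n == c))) 0).getD "")
        else opps) opps) PySem.Dict.empty).items]) []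

-- ===== PORT B =====
-- next(x for x in matchup if x != c); none (StopIteration in Python) only outside Pre_.
def pvFirstNe (matchup : List String) (c : String) : String :=
  (matchup.find? (fun x => !(x == c))).getD ""

def make_opponents_alt (schedule : List (List (List String))) (coaches : List String) : List (List (String × String)) :=
  let coach_set : PySem.Set String := PySem.Set.ofList coaches
  schedule.foldl (fun opponents s =>
    let mp : PySem.Dict String String := s.foldl (fun mp matchup =>
      matchup.foldl (fun mp c =>
        if PySem.Set.contains coach_set c then mp.insert c (pvFirstNe matchup c) else mp) mp)
      PySem.Dict.empty
    let opps : PySem.Dict String String := coaches.foldl (fun opps c =>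
      match mp.get? c with
      | some v => opps.insert c v
      | none => opps) PySem.Dict.empty
    opponents ++ [opps.items]) []

-- ===== PRECONDITION & SPEC =====
-- Pre_ excludes exactly the inputs where Python A raises IndexError (and B StopIteration):
-- a matchup containing a coach and no name different from that coach.
def Pre_make_opponents (schedule : List (List (List String))) (coaches : List String) : Prop :=
  ∀ s ∈ schedule, ∀ m ∈ s, ∀ c ∈ coaches, c ∈ m → ∃ x ∈ m, x ≠ c
instance (schedule : List (List (List String))) (coaches : List String) : Decidable (Pre_make_opponents schedule coaches) := by unfold Pre_make_opponents; infer_instance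

def pvWitness_make_opponents : List (List (List String)) × List String :=
  ([[["a", "b"], ["c", "d"]], [["a", "c"], ["b", "d"]]], ["a", "b", "c", "d"])

def Spec_make_opponents (schedule : List (List (List String))) (coaches : List String) (out : List (List (String × String))) : Prop := out = make_opponents_alt schedule coaches
instance (schedule : List (List (List String))) (coaches : List String) (out : List (List (String × String))) : Decidable (Spec_make_opponents schedule coaches out) := by unfold Spec_make_opponents; infer_instance

-- ===== CLAIM (what is proved, stated in full; the proofs are below) =====
def Claim_equal_make_opponents : Prop := ∀ (schedule : List (List (List String))) (coaches : List String), Dom_make_opponents schedule coaches → Pre_make_opponents schedule coaches → Spec_make_opponents schedule coaches (make_opponents schedule coaches)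

-- ===== LEMMAS AND PROOFS =====

-- the last matchup of s containing c, if any
def pvLastWith (s : List (List String)) (c : String) : Option (List String) :=
  match s with
  | [] => none
  | m :: rest => match pvLastWith rest c with
                 | some m' => some m'
                 | none => if m.contains c then some m else none

theorem pvA_inner (s : List (List String)) (c : String) (d : PySem.Dict String String) :
    s.foldl (fun opps matchup =>
        if matchup.contains c then
          opps.insert c ((PySem.List.pyGet? (matchup.filter (fun n => !(n == c))) 0).getD "")
        else opps) d =
      match pvLastWith s c with
      | none => d
      | some m => d.insert c ((PySem.List.pyGet? (m.filter (fun n => !(n == c))) 0).getD "") := by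
  induction s generalizing d with
  | nil => rfl
  | cons m rest ih =>
    simp only [List.foldl_cons, pvLastWith, ih]
    cases h : pvLastWith rest c with
    | none => cases hm : m.contains c <;> simp
    | some m' =>
      cases hm : m.contains c <;> simp [PySem.Dict.insert_insert_self]

theorem pvB_matchup (cs : PySem.Set String) (g : String → String) (c : String)
    (l : List String) (d : PySem.Dict String String) :
    (l.foldl (fun mp x => if PySem.Set.contains cs x then mp.insert x (g x) else mp) d).get? c =
      if c ∈ cs ∧ c ∈ l then some (g c) else d.get? c := by
  induction l generalizing d with
  | nil => simp
  | cons x l ih =>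
    simp only [List.foldl_cons, ih]
    by_cases hcs : c ∈ cs
    · by_cases hcl : c ∈ l
      · simp [hcs, hcl]
      · by_cases hcx : c = x
        · subst hcx
          simp [hcs, hcl, PySem.Dict.get?_insert_self]
        · by_cases hx : x ∈ cs <;>
            simp [hcs, hcl, hcx, hx, PySem.Dict.get?_insert]
    · have hcx : c ≠ x ∨ x ∉ cs := by
        by_cases h : c = x
        · subst h; exact Or.inr hcs
        · exact Or.inl h
      rcases hcx with h | h
      · by_cases hx : x ∈ cs <;>
          simp [hcs, h, hx, PySem.Dict.get?_insert]
      · simp [hcs, h]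

theorem pvB_round (cs : PySem.Set String) (c : String)
    (s : List (List String)) (d : PySem.Dict String String) :
    (s.foldl (fun mp matchup =>
        matchup.foldl (fun mp x =>
          if PySem.Set.contains cs x then mp.insert x (pvFirstNe matchup x) else mp) mp) d).get? c =
      if c ∈ cs then
        match pvLastWith s c with
        | some m => some (pvFirstNe m c)
        | none => d.get? c
      else d.get? c := by
  induction s generalizing d with
  | nil => by_cases hcs : c ∈ cs <;> simp [pvLastWith, hcs]
  | cons m rest ih =>
    simp only [List.foldl_cons, ih, pvLastWith]
    by_cases hcs : c ∈ cs
    · simp only [if_pos hcs]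
      cases h : pvLastWith rest c with
      | some m' => simp
      | none =>
        simp only
        rw [pvB_matchup]
        by_cases hm : c ∈ m
        · simp [hcs, hm]
        · simp [hcs, hm]
    · simp only [if_neg hcs]
      rw [pvB_matchup]
      simp [hcs]

-- the values A and B store for a coach agree: filter-head = find?
theorem pvVal_eq (m : List String) (c : String) :
    (PySem.List.pyGet? (m.filter (fun n => !(n == c))) 0).getD "" = pvFirstNe m c := by
  unfold pvFirstNe
  rw [PySem.List.pyGet?_zero, ← List.head?_eq_getElem?, List.head?_filter]

theorem pvRound_eq (coaches : List String) (s : List (List String)) :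
    (coaches.foldl (fun opps c =>
        s.foldl (fun opps matchup =>
          if matchup.contains c then
            opps.insert c ((PySem.List.pyGet? (matchup.filter (fun n => !(n == c))) 0).getD "")
          else opps) opps) PySem.Dict.empty) =
      (coaches.foldl (fun opps c =>
        match (s.foldl (fun mp matchup =>
            matchup.foldl (fun mp x =>
              if PySem.Set.contains (PySem.Set.ofList coaches) x then mp.insert x (pvFirstNe matchup x) else mp) mp)
          PySem.Dict.empty).get? c with
        | some v => opps.insert c v
        | none => opps) PySem.Dict.empty) := by
  apply PySem.List.foldl_congr_mem
  intro opps c hc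
  rw [pvA_inner, pvB_round]
  have hcs : c ∈ PySem.Set.ofList coaches := (PySem.Set.mem_ofList _ _).mpr hc
  rw [if_pos hcs]
  cases h : pvLastWith s c with
  | none => simp [PySem.Dict.get?_empty]
  | some m => simp [pvVal_eq]

-- ===== VERDICT (by name: the statement is the Claim_ definition above) =====
theorem make_opponents_spec : Claim_equal_make_opponents := by
  intro schedule coaches _ _
  unfold Spec_make_opponents make_opponents make_opponents_alt
  rw [PySem.List.foldl_append_singleton_eq_map, PySem.List.foldl_append_singleton_eq_map]
  simp only [List.nil_append]
  apply List.map_congr_left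
  intro s _
  rw [pvRound_eq]
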